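-- pv_equiv track=rewrite | github.com/ccomyns/long-context-reasoning | pipeline/dependency_scorer.py | _is_internal_import
-- ===== SOURCE A (Python) =====
-- def _is_internal_import(
--     module_name: str, module_index: dict[str, str]
-- ) -> bool:
--     """Check if an import refers to an internal module."""
--     # Direct match
--     if module_name in module_index:
--         return True
--     # Check if it's a submodule of an internal package
--     parts = module_name.split(".")
--     for i in range(len(parts), 0, -1):
--         prefix = ".".join(parts[:i])
--         if prefix in module_index:
--             return True
--     return False
-- ===== SOURCE B (Python) =====
-- def _is_internal_import(
--     module_name: str, module_index: dict[str, str]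
-- ) -> bool:
--     """Check if an import refers to an internal module."""
--     current = module_name
--     while True:
--         if current in module_index:
--             return True
--         if "." not in current:
--             return False
--         current = current.rpartition(".")[0]
-- ===== Notes on version B (the rewrite author's own statement) =====
-- stated objective: idiomatic
-- what changed: Replaces the split-into-parts list plus re-join of every slice with a single working string that is trimmed at its last '.' via rpartition until a hit or no dot remains, removing the redundant duplicate full-name check and all list building.
import Mathlib
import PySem

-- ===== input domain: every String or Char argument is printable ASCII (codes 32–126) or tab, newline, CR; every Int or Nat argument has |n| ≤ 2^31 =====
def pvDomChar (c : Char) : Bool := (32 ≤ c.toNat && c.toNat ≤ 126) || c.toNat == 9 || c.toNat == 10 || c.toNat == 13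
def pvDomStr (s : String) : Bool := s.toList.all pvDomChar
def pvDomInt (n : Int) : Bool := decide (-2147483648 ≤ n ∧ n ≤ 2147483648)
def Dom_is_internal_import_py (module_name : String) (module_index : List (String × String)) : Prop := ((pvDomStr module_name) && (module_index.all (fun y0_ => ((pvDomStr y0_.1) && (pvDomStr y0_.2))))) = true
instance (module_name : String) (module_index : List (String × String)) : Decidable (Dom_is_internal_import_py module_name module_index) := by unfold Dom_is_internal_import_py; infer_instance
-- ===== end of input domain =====

-- B idiomatically trims the working string at its last '.' (rpartition) instead of
-- splitting into a parts list and re-joining every slice; return values are identical.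

-- ===== PORT A =====
-- dict membership 'name in module_index' = some key equals name; string equality
-- compared on code points (exact). split('.') = PySem.Chars.splitOn, '.'.join = PySem.Chars.join.
def is_internal_import_py (module_name : String) (module_index : List (String × String)) : Bool :=
  if module_index.any (fun p => p.1.toList == module_name.toList) then true
  else
    let parts : List (List Char) := PySem.Chars.splitOn module_name.toList ['.']
    (PySem.List.pyRange (parts.length : Int) 0 (-1)).foldl
      (fun acc i =>
        acc || module_index.any (fun p =>
          p.1.toList == PySem.Chars.join ['.'] (PySem.List.slice parts none (some i))))
      false

-- ===== PORT B =====
-- current.rpartition(".")[0]: everything before the LAST '.' (exact for a 1-char separator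
-- that is known to occur: reverse, drop up to and including the first '.', reverse back).
def pvTrimLast (cs : List Char) : List Char :=
  (((cs.reverse).dropWhile (fun c => !(c == '.'))).drop 1).reverse

theorem pvTrimLast_length_lt (cs : List Char) (h : cs.contains '.' = true) :
    (pvTrimLast cs).length < cs.length := by
  have hmem : '.' ∈ cs.reverse := by
    simpa using (List.contains_iff_mem.mp h)
  have hne : cs.reverse.dropWhile (fun c => !(c == '.')) ≠ [] := by
    intro hnil
    have := (List.dropWhile_eq_nil_iff).mp hnil _ hmem
    simp at this
  have h1 : 1 ≤ (cs.reverse.dropWhile (fun c => !(c == '.'))).length :=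
    Nat.one_le_iff_ne_zero.mpr (by simpa [List.length_eq_zero_iff] using hne)
  have h2 : (cs.reverse.dropWhile (fun c => !(c == '.'))).length ≤ cs.length := by
    simpa using List.length_dropWhile_le (fun c => !(c == '.')) cs.reverse
  simp only [pvTrimLast, List.length_reverse, List.length_drop]
  omega

-- the while-loop of B: test membership, stop when no dot remains, else trim
def pvBLoop (module_index : List (String × String)) (cs : List Char) : Bool :=
  if module_index.any (fun p => p.1.toList == cs) then true
  else if h : cs.contains '.' then pvBLoop module_index (pvTrimLast cs)
  else false
termination_by cs.length
decreasing_by exact pvTrimLast_length_lt cs h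

def is_internal_import_py_alt (module_name : String) (module_index : List (String × String)) : Bool :=
  pvBLoop module_index module_name.toList

-- ===== PRECONDITION & SPEC =====
def Spec_is_internal_import_py (module_name : String) (module_index : List (String × String)) (out : Bool) : Prop := out = is_internal_import_py_alt module_name module_index
instance (module_name : String) (module_index : List (String × String)) (out : Bool) : Decidable (Spec_is_internal_import_py module_name module_index out) := by unfold Spec_is_internal_import_py; infer_instance

-- ===== CLAIM (what is proved, stated in full; the proofs are below) =====
def Claim_equal_is_internal_import_py : Prop := ∀ (module_name : String) (module_index : List (String × String)), Dom_is_internal_import_py module_name module_index → Spec_is_internal_import_py module_name module_index (is_internal_import_py module_name module_index)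

-- ===== LEMMAS AND PROOFS =====

-- a clean structural model of s.split('.')
def pvConsHead (c : Char) : List (List Char) → List (List Char)
  | [] => [[c]]
  | h :: t => (c :: h) :: t

def pvSplit : List Char → List (List Char)
  | [] => [[]]
  | c :: rest => if c = '.' then [] :: pvSplit rest else pvConsHead c (pvSplit rest)

def pvPrependAll (pre : List Char) : List (List Char) → List (List Char)
  | [] => [pre]
  | h :: t => (pre ++ h) :: t

theorem pvSplit_ne_nil (cs : List Char) : pvSplit cs ≠ [] := by
  cases cs with
  | nil => simp [pvSplit]
  | cons c rest =>
    simp only [pvSplit]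
    split
    · simp
    · cases h : pvSplit rest <;> simp [pvConsHead]

theorem pvGo_eq (fuel : Nat) (l cur : List Char) (acc : List (List Char))
    (hf : l.length < fuel) :
    PySem.Chars.splitOn.go ['.'] fuel l cur acc
      = acc.reverse ++ pvPrependAll cur.reverse (pvSplit l) := by
  induction fuel generalizing l cur acc with
  | zero => omega
  | succ fuel ih =>
    cases l with
    | nil =>
      simp [PySem.Chars.splitOn.go, pvSplit, pvPrependAll]
    | cons c rest =>
      by_cases hc : c = '.'
      · subst hc
        have hpre : List.isPrefixOf ['.'] ('.' :: rest) = true := by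
          simp [List.isPrefixOf]
        rw [PySem.Chars.splitOn.go]
        simp only [hpre, if_pos]
        have hdrop : List.drop ['.'].length ('.' :: rest) = rest := rfl
        rw [hdrop, ih rest [] (cur.reverse :: acc) (by simpa using Nat.lt_of_succ_lt_succ (by simpa using hf))]
        obtain ⟨h, t, hht⟩ : ∃ h t, pvSplit rest = h :: t := by
          cases hsp : pvSplit rest with
          | nil => exact absurd hsp (pvSplit_ne_nil rest)
          | cons h t => exact ⟨h, t, rfl⟩
        simp [pvSplit, pvPrependAll, hht]
      · have hpre : List.isPrefixOf ['.'] (c :: rest) = false := by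
          simp [List.isPrefixOf]
          exact fun h => absurd h.symm hc
        rw [PySem.Chars.splitOn.go]
        simp only [hpre, Bool.false_eq_true, if_false]
        rw [ih rest (c :: cur) acc (by simpa using Nat.lt_of_succ_lt_succ (by simpa using hf))]
        cases hsp : pvSplit rest with
        | nil => exact absurd hsp (pvSplit_ne_nil rest)
        | cons h t =>
          simp [pvSplit, hc, pvConsHead, hsp, pvPrependAll]

theorem pvSplitOn_eq (cs : List Char) :
    PySem.Chars.splitOn cs ['.'] = pvSplit cs := by
  rw [PySem.Chars.splitOn, pvGo_eq (cs.length + 1) cs [] [] (Nat.lt_succ_self _)]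
  obtain ⟨h, t, hht⟩ : ∃ h t, pvSplit cs = h :: t := by
    cases hsp : pvSplit cs with
    | nil => exact absurd hsp (pvSplit_ne_nil cs)
    | cons h t => exact ⟨h, t, rfl⟩
  simp [hht, pvPrependAll]

theorem pvSplit_no_dot (cs : List Char) (h : '.' ∉ cs) : pvSplit cs = [cs] := by
  induction cs with
  | nil => rfl
  | cons c rest ih =>
    have hc : c ≠ '.' := fun hc => h (hc ▸ List.mem_cons_self)
    have hrest : '.' ∉ rest := fun hm => h (List.mem_cons_of_mem _ hm)
    simp [pvSplit, hc, ih hrest, pvConsHead]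

theorem pvConsHead_join (c : Char) (xs : List (List Char)) (h : xs ≠ []) :
    PySem.Chars.join ['.'] (pvConsHead c xs) = c :: PySem.Chars.join ['.'] xs := by
  cases xs with
  | nil => exact absurd rfl h
  | cons x t =>
    cases t with
    | nil => simp [pvConsHead, PySem.Chars.join_singleton]
    | cons y t' => simp [pvConsHead, PySem.Chars.join_cons_cons]

theorem pvJoin_pvSplit (cs : List Char) :
    PySem.Chars.join ['.'] (pvSplit cs) = cs := by
  induction cs with
  | nil => simp [pvSplit, PySem.Chars.join_singleton]
  | cons c rest ih =>
    by_cases hc : c = '.'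
    · subst hc
      obtain ⟨h, t, hht⟩ : ∃ h t, pvSplit rest = h :: t := by
        cases hsp : pvSplit rest with
        | nil => exact absurd hsp (pvSplit_ne_nil rest)
        | cons h t => exact ⟨h, t, rfl⟩
      rw [show pvSplit ('.' :: rest) = [] :: pvSplit rest from by simp [pvSplit], hht]
      rw [PySem.Chars.join_cons_cons]
      rw [hht] at ih
      simp [ih]
    · simp only [pvSplit, if_neg hc]
      rw [pvConsHead_join c _ (pvSplit_ne_nil rest), ih]

theorem pvConsHead_append (c : Char) (xs : List (List Char)) (y : List Char) (h : xs ≠ []) :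
    pvConsHead c (xs ++ [y]) = pvConsHead c xs ++ [y] := by
  cases xs with
  | nil => exact absurd rfl h
  | cons x t => simp [pvConsHead]

theorem pvSplit_append (pre last : List Char) (h : '.' ∉ last) :
    pvSplit (pre ++ '.' :: last) = pvSplit pre ++ [last] := by
  induction pre with
  | nil => simp [pvSplit, pvSplit_no_dot last h]
  | cons c pre' ih =>
    by_cases hc : c = '.'
    · subst hc; simp [pvSplit, ih]
    · simp only [List.cons_append, pvSplit, if_neg hc, ih]
      exact pvConsHead_append c _ _ (pvSplit_ne_nil pre')

-- decomposition of a dotted string at its LAST dot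
theorem pvDecomp (cs : List Char) (h : cs.contains '.' = true) :
    cs = pvTrimLast cs ++ '.' :: (cs.reverse.takeWhile (fun c => !(c == '.'))).reverse
      ∧ '.' ∉ (cs.reverse.takeWhile (fun c => !(c == '.'))).reverse := by
  have hmem : '.' ∈ cs.reverse := by simpa using (List.contains_iff_mem.mp h)
  obtain ⟨d, tl, hdw⟩ : ∃ d tl, cs.reverse.dropWhile (fun c => !(c == '.')) = d :: tl := by
    cases hsp : cs.reverse.dropWhile (fun c => !(c == '.')) with
    | nil =>
      have := (List.dropWhile_eq_nil_iff).mp hsp _ hmem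
      simp at this
    | cons d tl => exact ⟨d, tl, rfl⟩
  have hd : d = '.' := by
    have hh := List.head_dropWhile_not (fun c => !(c == '.')) (l := cs.reverse) (by simp [hdw])
    simp only [hdw, List.head_cons] at hh
    simpa using hh
  have htrim : pvTrimLast cs = tl.reverse := by
    simp [pvTrimLast, hdw]
  constructor
  · rw [htrim]
    conv_lhs => rw [← cs.reverse_reverse,
      ← List.takeWhile_append_dropWhile (p := fun c => !(c == '.')) (l := cs.reverse)]
    rw [hdw, hd]
    simp
  · intro hmm
    have := List.mem_takeWhile_imp (by simpa using hmm)
    simp at this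

-- turn A's or-fold into `any`
theorem pvFoldl_or {α : Type} (l : List α) (f : α → Bool) (b : Bool) :
    l.foldl (fun acc i => acc || f i) b = (b || l.any f) := by
  induction l generalizing b with
  | nil => simp
  | cons x t ih => simp [List.foldl_cons, ih, Bool.or_assoc]

theorem pvAny_congr {α : Type} (l : List α) (p q : α → Bool) (h : ∀ x ∈ l, p x = q x) :
    l.any p = l.any q := by
  induction l with
  | nil => rfl
  | cons x t ih =>
    simp only [List.any_cons, h x List.mem_cons_self,
      ih (fun y hy => h y (List.mem_cons_of_mem _ hy))]

-- the core induction: A's prefix scan equals B's trimming loop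
theorem pvMain (mi : List (String × String)) :
    ∀ n (cs : List Char), cs.length ≤ n →
      (mi.any (fun p => p.1.toList == cs)
        || (PySem.List.pyRange ((pvSplit cs).length : Int) 0 (-1)).any
            (fun i => mi.any (fun p =>
              p.1.toList == PySem.Chars.join ['.'] (PySem.List.slice (pvSplit cs) none (some i)))))
      = pvBLoop mi cs := by
  intro n
  induction n with
  | zero =>
    intro cs hcs
    have : cs = [] := List.length_eq_zero_iff.mp (Nat.le_zero.mp hcs)
    subst this
    have h1 : ((pvSplit ([] : List Char)).length : Int) = 1 := by simp [pvSplit]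
    have h2 : PySem.Chars.join ['.'] (PySem.List.slice (pvSplit ([] : List Char)) none (some 1)) = ([] : List Char) := by
      rw [PySem.List.slice_to _ (by norm_num)]
      simp [pvSplit, PySem.Chars.join_singleton]
    rw [pvBLoop, h1, PySem.List.pyRange_neg_one_cons (by norm_num),
      PySem.List.pyRange_neg_one_eq_nil (by norm_num)]
    simp only [List.any_cons, List.any_nil, h2]
    cases hm : mi.any (fun p => p.1.toList == ([] : List Char)) <;> simp [hm]
  | succ n ih =>
    intro cs hcs
    by_cases hdot : cs.contains '.' = true
    · -- cs = pre ++ '.' :: last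
      obtain ⟨heq, hlast⟩ := pvDecomp cs hdot
      set pre := pvTrimLast cs with hpre
      set last := (cs.reverse.takeWhile (fun c => !(c == '.'))).reverse with hlastdef
      have hsplit : pvSplit cs = pvSplit pre ++ [last] := by
        rw [heq]; exact pvSplit_append pre last hlast
      obtain ⟨h0, t0, hht⟩ : ∃ h t, pvSplit pre = h :: t := by
        cases hsp : pvSplit pre with
        | nil => exact absurd hsp (pvSplit_ne_nil pre)
        | cons h t => exact ⟨h, t, rfl⟩
      have hn' : 0 < (pvSplit pre).length := by rw [hht]; simp
      have hlen : ((pvSplit cs).length : Int) = ((pvSplit pre).length : Int) + 1 := by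
        rw [hsplit]
        push_cast [List.length_append, List.length_singleton]
        ring
      -- peel the top index: its prefix is the full string cs
      have htop :
          PySem.Chars.join ['.'] (PySem.List.slice (pvSplit cs) none (some ((pvSplit pre).length + 1 : Int))) = cs := by
        rw [PySem.List.slice_to _ (by positivity)]
        have : ((pvSplit pre).length + 1 : Int).toNat = (pvSplit cs).length := by
          rw [hsplit]; simp
        rw [this, List.take_length, pvJoin_pvSplit]
      -- indices 1..n' talk about pre's split only
      have hrest : ∀ i ∈ PySem.List.pyRange ((pvSplit pre).length : Int) 0 (-1),
          PySem.List.slice (pvSplit cs) none (some i) = PySem.List.slice (pvSplit pre) none (some i) := by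
        intro i hi
        rw [PySem.List.mem_pyRange_neg_one] at hi
        rw [PySem.List.slice_to _ (by omega), PySem.List.slice_to _ (by omega), hsplit,
          List.take_append_of_le_length (by omega)]
      rw [pvBLoop]
      rw [hlen, PySem.List.pyRange_neg_one_cons (by positivity)]
      simp only [List.any_cons]
      rw [htop]
      have hrange_eq :
          (PySem.List.pyRange (((pvSplit pre).length : Int) + 1 - 1) 0 (-1)).any
            (fun i => mi.any (fun p =>
              p.1.toList == PySem.Chars.join ['.'] (PySem.List.slice (pvSplit cs) none (some i))))
          = (PySem.List.pyRange ((pvSplit pre).length : Int) 0 (-1)).any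
            (fun i => mi.any (fun p =>
              p.1.toList == PySem.Chars.join ['.'] (PySem.List.slice (pvSplit pre) none (some i)))) := by
        have hxx : (((pvSplit pre).length : Int) + 1 - 1) = ((pvSplit pre).length : Int) := by ring
        rw [hxx]
        exact pvAny_congr _ _ _ (fun i hi => by rw [hrest i hi])
      -- direct test on pre is absorbed by the i = n' term of pre's own range
      have habs :
          (mi.any (fun p => p.1.toList == pre)
            || (PySem.List.pyRange ((pvSplit pre).length : Int) 0 (-1)).any
                (fun i => mi.any (fun p =>
                  p.1.toList == PySem.Chars.join ['.'] (PySem.List.slice (pvSplit pre) none (some i)))))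
          = (PySem.List.pyRange ((pvSplit pre).length : Int) 0 (-1)).any
                (fun i => mi.any (fun p =>
                  p.1.toList == PySem.Chars.join ['.'] (PySem.List.slice (pvSplit pre) none (some i)))) := by
        rw [PySem.List.pyRange_neg_one_cons (by positivity)]
        simp only [List.any_cons]
        have hfull : PySem.Chars.join ['.'] (PySem.List.slice (pvSplit pre) none (some ((pvSplit pre).length : Int))) = pre := by
          rw [PySem.List.slice_to _ (by positivity)]
          simp [pvJoin_pvSplit]
        rw [hfull]
        cases mi.any (fun p => p.1.toList == pre) <;>
          simp [Bool.or_assoc, Bool.or_comm, Bool.or_left_comm]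
      have hprelen : pre.length ≤ n := by
        have := pvTrimLast_length_lt cs hdot
        rw [hpre]
        omega
      have hPreEq :
          (PySem.List.pyRange ((pvSplit pre).length : Int) 0 (-1)).any
            (fun i => mi.any (fun p =>
              p.1.toList == PySem.Chars.join ['.'] (PySem.List.slice (pvSplit pre) none (some i))))
          = pvBLoop mi pre := by
        rw [← habs]
        exact ih pre hprelen
      rw [hrange_eq, hPreEq]
      rw [dif_pos hdot, ← hpre]
      cases hm : mi.any (fun p => p.1.toList == cs) <;> simp [hm]
    · -- no dot: split is [cs], one index, testing cs again
      have hnm : '.' ∉ cs := by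
        intro hmm; exact hdot (List.contains_iff_mem.mpr (by simpa using hmm))
      rw [pvBLoop]
      have h1 : pvSplit cs = [cs] := pvSplit_no_dot cs hnm
      rw [h1]
      have h2 : (([cs] : List (List Char)).length : Int) = 1 := by simp
      rw [h2, PySem.List.pyRange_neg_one_cons (by norm_num),
        PySem.List.pyRange_neg_one_eq_nil (by norm_num)]
      simp only [List.any_cons, List.any_nil]
      rw [PySem.List.slice_to _ (by norm_num)]
      simp only [show ((1 : Int)).toNat = 1 from rfl, List.take_succ_cons, List.take_nil,
        PySem.Chars.join_singleton]
      simp only [hdot]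
      cases hm : mi.any (fun p => p.1.toList == cs) <;> simp [hm]

-- ===== VERDICT (by name: the statement is the Claim_ definition above) =====
theorem is_internal_import_py_spec : Claim_equal_is_internal_import_py := by
  intro module_name module_index _
  unfold Spec_is_internal_import_py is_internal_import_py is_internal_import_py_alt
  simp only [pvSplitOn_eq, pvFoldl_or, Bool.false_or]
  rw [← pvMain module_index module_name.toList.length module_name.toList (le_refl _)]
  by_cases hm : module_index.any (fun p => p.1.toList == module_name.toList) = true
  · simp [hm]
  · simp only [Bool.not_eq_true] at hm
    simp [hm]
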